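-- pv_equiv track=rewrite | github.com/ctfs/write-ups-2016 | csaw-ctf-2016-quals/Forensics/brainfun-50/create_image.py | create_image_list
-- ===== SOURCE A (Python) =====
-- def create_image_list(l, cols, rep):
--
--     row_list = []
--     i_list = []
--     for i in range(len(l)):
--
--         if (i+1) % cols == 0: # last column
--             for j in range(rep):
--                 row_list.append(l[i])
--                 i_list.append(row_list)
--             row_list = []
--             # pdb.set_trace()
--         else:
--             for j in range(rep):
--                 row_list.append(l[i])
--
--     return(i_list)
-- ===== SOURCE B (Python) =====
-- def create_image_list(l, cols, rep):
--     i_list = []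
--     for r in range(len(l) // cols):
--         row = [x for x in l[r * cols:(r + 1) * cols] for _ in range(rep)]
--         i_list.extend([row] * rep)
--     return i_list
-- ===== Notes on version B (the rewrite author's own statement) =====
-- stated objective: alternative
-- what changed: Replaces A's index-by-index loop with a mutable partial-row accumulator and a modulo boundary test by direct chunking (one slice of cols elements per full row, repeated rep times); Pre_ restricts to the natural domain of positive column counts: for cols = 0 A raises ZeroDivisionError (or returns [] on empty l where B raises), and for negative cols A's chunking by |cols| is an accident of Python's modulo sign.
-- outside the precondition, e.g. on create_image_list([1, 2], -2, 1): A returns [[1, 2]], B returns []; on create_image_list([], 0, 1): A returns [], B raises ZeroDivisionError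
import Mathlib
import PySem

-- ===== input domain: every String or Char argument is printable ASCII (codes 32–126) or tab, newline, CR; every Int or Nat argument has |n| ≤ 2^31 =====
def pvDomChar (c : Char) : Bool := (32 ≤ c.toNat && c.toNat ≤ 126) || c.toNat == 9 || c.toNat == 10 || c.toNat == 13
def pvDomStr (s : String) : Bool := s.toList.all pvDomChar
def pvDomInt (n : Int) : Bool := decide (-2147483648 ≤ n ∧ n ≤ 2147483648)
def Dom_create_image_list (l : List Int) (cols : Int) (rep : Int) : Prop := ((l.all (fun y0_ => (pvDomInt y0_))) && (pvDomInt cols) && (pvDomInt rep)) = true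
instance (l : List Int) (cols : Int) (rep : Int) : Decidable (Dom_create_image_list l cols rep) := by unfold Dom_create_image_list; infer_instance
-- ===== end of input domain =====

-- B chunks the flat list directly (one slice of cols elements per full row) instead of A's
-- index-by-index loop with a mutable row accumulator; equivalence is about the RETURN VALUE
-- (A returns rep aliased references to each row object; both compare equal as values).

-- ===== PORT A =====
-- Transliteration of A's loop: state = (row_list, i_list); the inner `for j in range(rep)`
-- loops append the same value rep times (ported as List.replicate rep.toNat); the rep appended
-- references to the aliased, still-mutated row_list are ported by their final value.
-- PySem.Int.mod is exact for cols ≠ 0; Python raises ZeroDivisionError at cols = 0 on nonempty l.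
def create_image_list (l : List Int) (cols : Int) (rep : Int) : List (List Int) :=
  ((PySem.List.pyRange 0 (l.length : Int) 1).foldl
    (fun (s : List Int × List (List Int)) i =>
      if PySem.Int.mod (i + 1) cols = 0 then
        ([], s.2 ++ List.replicate rep.toNat (s.1 ++ List.replicate rep.toNat (PySem.List.pyGetD l i 0)))
      else
        (s.1 ++ List.replicate rep.toNat (PySem.List.pyGetD l i 0), s.2))
    ([], [])).2

-- ===== PORT B =====
-- Transliteration of Source B: one full chunk slice of cols elements per loop iteration.
def create_image_list_alt (l : List Int) (cols : Int) (rep : Int) : List (List Int) :=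
  (PySem.List.pyRange 0 (PySem.Int.floordiv (l.length : Int) cols) 1).foldl
    (fun acc r =>
      acc ++ List.replicate rep.toNat
        ((PySem.List.slice l (some (r * cols)) (some ((r + 1) * cols))).flatMap
          (fun x => List.replicate rep.toNat x)))
    []

-- ===== PRECONDITION & SPEC =====
-- Pre_ restricts to the natural domain of positive column counts: for cols = 0 A raises
-- ZeroDivisionError on nonempty l (and B raises on any l), and for negative cols A's chunking
-- by |cols| is an accident of Python's modulo sign (B returns [] there).
def Pre_create_image_list (_l : List Int) (cols : Int) (_rep : Int) : Prop := 0 < cols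
instance (l : List Int) (cols : Int) (rep : Int) : Decidable (Pre_create_image_list l cols rep) := by unfold Pre_create_image_list; infer_instance
def pvWitness_create_image_list : List Int × Int × Int := ([1, 2, 3, 4, 5], 2, 3)

def Spec_create_image_list (l : List Int) (cols : Int) (rep : Int) (out : List (List Int)) : Prop := out = create_image_list_alt l cols rep
instance (l : List Int) (cols : Int) (rep : Int) (out : List (List Int)) : Decidable (Spec_create_image_list l cols rep out) := by unfold Spec_create_image_list; infer_instance

-- ===== CLAIM (what is proved, stated in full; the proofs are below) =====
def Claim_equal_create_image_list : Prop := ∀ (l : List Int) (cols : Int) (rep : Int), Dom_create_image_list l cols rep → Pre_create_image_list l cols rep → Spec_create_image_list l cols rep (create_image_list l cols rep)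

-- ===== LEMMAS AND PROOFS =====

-- the common closed form: one row of rep-repeated elements per full chunk, repeated rep times
def pvRows (l : List Int) (k : Nat) (rep : Int) : List (List Int) :=
  (List.range (l.length / k)).flatMap
    (fun r => List.replicate rep.toNat
      (((l.drop (r * k)).take k).flatMap (fun x => List.replicate rep.toNat x)))

-- A's fold step, on (index, element) pairs
def pvStepA (cols rep : Int) (s : List Int × List (List Int)) (p : Int × Int) : List Int × List (List Int) :=
  if PySem.Int.mod (p.1 + 1) cols = 0 then
    ([], s.2 ++ List.replicate rep.toNat (s.1 ++ List.replicate rep.toNat p.2))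
  else
    (s.1 ++ List.replicate rep.toNat p.2, s.2)

theorem pvDvd_iff (cols m : Int) : (PySem.Int.mod m cols = 0) ↔ ((cols.natAbs : Int) ∣ m) := by
  rw [PySem.Int.mod_eq_zero_iff_dvd, Int.natAbs_dvd]

theorem pvNotDvdInt (k s j : Nat) (hs : k ∣ s) (hj : j + 1 < k) :
    ¬ ((k : Int) ∣ ((s : Int) + (j : Int) + 1)) := by
  intro h
  have hsd : (k : Int) ∣ (s : Int) := Int.natCast_dvd_natCast.mpr hs
  have e : (s : Int) + (j : Int) + 1 = (s : Int) + ((j : Int) + 1) := by ring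
  rw [e] at h
  have h2 : (k : Int) ∣ ((j : Int) + 1) := (Int.dvd_add_right hsd).mp h
  have h5 : k ∣ (j + 1) := by exact_mod_cast h2
  have := Nat.le_of_dvd (by omega) h5
  omega

-- within a chunk: no index hits the boundary condition, row just accumulates
theorem pvNoBoundary (cols rep : Int) (g : List Int) :
    ∀ (s : Int) (row : List Int) (out : List (List Int)),
    (∀ p ∈ PySem.List.enumerate g s, ¬ PySem.Int.mod (p.1 + 1) cols = 0) →
    List.foldl (pvStepA cols rep) (row, out) (PySem.List.enumerate g s)
      = (row ++ g.flatMap (fun x => List.replicate rep.toNat x), out) := by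
  induction g with
  | nil => intro s row out _; simp [PySem.List.enumerate_nil]
  | cons x xs ih =>
    intro s row out h
    rw [PySem.List.enumerate_cons]
    have hx : ¬ PySem.Int.mod (s + 1) cols = 0 := by
      have := h (s, x) (by rw [PySem.List.enumerate_cons]; exact List.mem_cons_self)
      simpa using this
    simp only [List.foldl_cons, pvStepA, hx, if_false]
    rw [ih (s + 1) _ out (fun p hp => h p (by rw [PySem.List.enumerate_cons]; exact List.mem_cons_of_mem _ hp))]
    simp

-- main invariant: starting a fresh row at a chunk boundary produces exactly the full-chunk rows
theorem pvChunkInv (cols rep : Int) (hcols : cols ≠ 0) :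
    ∀ (n : Nat) (l : List Int), l.length = n → ∀ (s : Nat), cols.natAbs ∣ s →
    ∀ (out : List (List Int)),
    (List.foldl (pvStepA cols rep) ([], out) (PySem.List.enumerate l (s : Int))).2
      = out ++ pvRows l cols.natAbs rep := by
  intro n
  induction n using Nat.strong_induction_on with
  | _ n ih =>
    intro l hl s hs out
    set k := cols.natAbs with hk
    have hkpos : 0 < k := Int.natAbs_pos.mpr hcols
    by_cases hsmall : l.length < k
    · -- no full chunk: all indices miss the boundary
      rw [pvNoBoundary cols rep l (s : Int) [] out ?_]
      · simp [pvRows, Nat.div_eq_of_lt hsmall]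
      · intro p hp
        rw [PySem.List.mem_enumerate_iff] at hp
        obtain ⟨j, hj, rfl⟩ := hp
        rw [pvDvd_iff]
        exact pvNotDvdInt k s j hs (by omega)
    · -- peel one full chunk of k elements
      rw [not_lt] at hsmall
      have hsplit := List.take_append_drop k l
      have hlen_take : (l.take k).length = k := by simp [Nat.min_eq_left hsmall]
      -- g = the chunk; split it into its first k-1 elements and its last one
      set g := l.take k with hg
      have hgne : g ≠ [] := by
        intro h; rw [h] at hlen_take; simp at hlen_take; omega
      have hgsplit : g = g.dropLast ++ [g.getLast hgne] := (List.dropLast_append_getLast hgne).symm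
      have hdl : g.dropLast.length = k - 1 := by simp [hlen_take]
      conv_lhs => rw [← hsplit]
      rw [PySem.List.enumerate_append, List.foldl_append]
      rw [hgsplit, PySem.List.enumerate_append, List.foldl_append]
      rw [pvNoBoundary cols rep g.dropLast (s : Int) [] out ?_]
      · -- the single boundary step
        have hlast : PySem.Int.mod (((s : Int) + (g.dropLast.length : Int)) + 1) cols = 0 := by
          rw [pvDvd_iff, hdl]
          have : ((s : Int) + (↑(k - 1) : Int)) + 1 = ((s + k : Nat) : Int) := by push_cast; omega
          rw [this]
          exact_mod_cast Nat.dvd_add hs dvd_rfl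
        rw [PySem.List.enumerate_cons, PySem.List.enumerate_nil]
        simp only [List.foldl_cons, List.foldl_nil, pvStepA, hlast, if_true]
        -- now the recursive call on l.drop k starting at s + k
        have hlen_g : (g.length : Int) = (k : Int) := by rw [hlen_take]
        have hcast : (s : Int) + (g.length : Int) = ((s + k : Nat) : Int) := by push_cast [hlen_take]; ring
        rw [hgsplit] at hcast
        rw [hcast]
        rw [ih (l.drop k).length (by rw [List.length_drop]; omega) (l.drop k) rfl (s + k) (Nat.dvd_add hs dvd_rfl)]
        -- assemble: rows of l = first chunk row ++ rows of (l.drop k)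
        have hrow : ([] : List Int) ++ g.dropLast.flatMap (fun x => List.replicate rep.toNat x) ++ List.replicate rep.toNat (g.getLast hgne)
            = g.flatMap (fun x => List.replicate rep.toNat x) := by
          conv_rhs => rw [hgsplit]
          simp
        rw [hrow]
        -- identity on pvRows
        have hdiv : l.length / k = (l.length - k) / k + 1 := Nat.div_eq_sub_div hkpos hsmall
        unfold pvRows
        rw [List.length_drop, hdiv, List.range_succ_eq_map, List.flatMap_cons, List.flatMap_map]
        simp only [Nat.zero_mul, List.drop_zero, ← hg]
        have hfun : ∀ r : Nat, ((l.drop k).drop (r * k)).take k = (l.drop ((r + 1) * k)).take k := by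
          intro r
          rw [List.drop_drop]
          have e : k + r * k = (r + 1) * k := by ring
          rw [e]
        have : (List.flatMap (fun r => List.replicate rep.toNat
              ((((l.drop k).drop (r * k)).take k).flatMap fun x => List.replicate rep.toNat x))
              (List.range ((l.length - k) / k)))
            = (List.flatMap (fun a => List.replicate rep.toNat
              (((l.drop (Nat.succ a * k)).take k).flatMap fun x => List.replicate rep.toNat x))
              (List.range ((l.length - k) / k))) := by
          apply List.flatMap_congr
          intro r _
          rw [hfun r]
        rw [this, List.append_assoc]
      · -- no boundary inside the first k-1 indices
        intro p hp
        rw [PySem.List.mem_enumerate_iff] at hp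
        obtain ⟨j, hj, rfl⟩ := hp
        rw [hdl] at hj
        rw [pvDvd_iff]
        exact pvNotDvdInt k s j hs (by omega)

-- A computes the closed form
theorem pvA_eq (l : List Int) (cols rep : Int) (hcols : cols ≠ 0) :
    create_image_list l cols rep = pvRows l cols.natAbs rep := by
  unfold create_image_list
  have henum := PySem.List.enumerate_eq_map_pyRange l 0
  have hlen : PySem.List.len l = (l.length : Int) := by simp [PySem.List.len_eq]
  rw [hlen] at henum
  have hfold : (PySem.List.pyRange 0 (l.length : Int) 1).foldl
      (fun (s : List Int × List (List Int)) i =>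
        if PySem.Int.mod (i + 1) cols = 0 then
          ([], s.2 ++ List.replicate rep.toNat (s.1 ++ List.replicate rep.toNat (PySem.List.pyGetD l i 0)))
        else
          (s.1 ++ List.replicate rep.toNat (PySem.List.pyGetD l i 0), s.2))
      ([], [])
      = List.foldl (pvStepA cols rep) ([], []) (PySem.List.enumerate l 0) := by
    rw [henum, List.foldl_map]
    rfl
  rw [hfold]
  have := pvChunkInv cols rep hcols l.length l rfl 0 (dvd_zero _) []
  simpa using this

-- B computes the closed form (for positive cols)
theorem pvB_eq (l : List Int) (cols rep : Int) (hcols : 0 < cols) :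
    create_image_list_alt l cols rep = pvRows l cols.natAbs rep := by
  unfold create_image_list_alt
  set k := cols.natAbs with hk
  have hkpos : 0 < k := Int.natAbs_pos.mpr (by omega)
  have hckk : cols = (k : Int) := by rw [hk, Int.natAbs_of_nonneg (by omega)]
  rw [hckk]
  rw [PySem.Int.floordiv_natCast l.length k]
  rw [PySem.List.pyRange_zero_nat, List.foldl_map]
  have hslice : ∀ r : Nat, PySem.List.slice l (some ((r : Int) * (k : Int))) (some (((r : Int) + 1) * (k : Int)))
      = (l.drop (r * k)).take k := by
    intro r
    rw [PySem.List.slice_toNat l (by positivity) (by positivity)]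
    have h1 : ((r : Int) * (k : Int)).toNat = r * k := by exact_mod_cast Int.toNat_natCast (r * k)
    have h2 : (((r : Int) + 1) * (k : Int)).toNat = (r + 1) * k := by
      have : ((r : Int) + 1) * (k : Int) = (((r + 1) * k : Nat) : Int) := by push_cast; ring
      rw [this]; exact Int.toNat_natCast _
    rw [h1, h2]
    have e : (r + 1) * k = r * k + k := by ring
    rw [e]
    congr 1
    omega
  have hcongr : List.foldl (fun acc (r : Nat) =>
        acc ++ List.replicate rep.toNat
          ((PySem.List.slice l (some ((r : Int) * (k : Int))) (some (((r : Int) + 1) * (k : Int)))).flatMap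
            (fun x => List.replicate rep.toNat x))) []
        (List.range (l.length / k))
      = List.foldl (fun acc (r : Nat) =>
        acc ++ List.replicate rep.toNat
          (((l.drop (r * k)).take k).flatMap (fun x => List.replicate rep.toNat x))) []
        (List.range (l.length / k)) := by
    apply PySem.List.foldl_congr_mem
    intro acc r _
    rw [hslice r]
  rw [hcongr, PySem.List.foldl_append_eq_flatMap]
  simp [pvRows]

-- ===== VERDICT (by name: the statement is the Claim_ definition above) =====
theorem create_image_list_spec : Claim_equal_create_image_list := by
  intro l cols rep _ hpre
  unfold Spec_create_image_list
  rw [pvA_eq l cols rep (by unfold Pre_create_image_list at hpre; omega),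
      pvB_eq l cols rep hpre]
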